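-- pv_equiv track=rewrite | github.com/Ajay2812/DSA | data structures/Maze/dominant.py | dominant
-- ===== SOURCE A (Python) =====
-- def dominant(nums):
--     if len(nums)==0:
--         return -2
--     s=0
--     for i in range(len(nums)):
--         if i==len(nums)-1 or nums[i]>max(nums[i+1:]):
--             s+=nums[i]
--     return s
-- ===== SOURCE B (Python) =====
-- def dominant(nums):
--     if not nums:
--         return -2
--     s = nums[-1]
--     m = nums[-1]
--     for x in reversed(nums[:-1]):
--         if x > m:
--             s += x
--             m = x
--     return s
-- ===== Notes on version B (the rewrite author's own statement) =====
-- stated objective: faster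
-- what changed: Replaced the per-index max(nums[i+1:]) rescans with a single right-to-left pass maintaining a running suffix maximum.
import Mathlib
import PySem

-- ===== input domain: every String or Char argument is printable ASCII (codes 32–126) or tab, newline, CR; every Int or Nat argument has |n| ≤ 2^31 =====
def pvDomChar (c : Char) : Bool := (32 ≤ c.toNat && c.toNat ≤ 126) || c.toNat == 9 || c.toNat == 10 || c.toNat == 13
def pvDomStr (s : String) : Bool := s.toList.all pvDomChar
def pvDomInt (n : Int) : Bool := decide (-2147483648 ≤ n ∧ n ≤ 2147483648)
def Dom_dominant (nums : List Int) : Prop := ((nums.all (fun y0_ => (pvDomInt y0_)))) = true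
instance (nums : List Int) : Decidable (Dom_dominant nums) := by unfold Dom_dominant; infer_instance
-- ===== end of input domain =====

-- B replaces A's per-index max(nums[i+1:]) rescans (O(n^2)) by one right-to-left pass with a running suffix maximum (O(n)).


-- ===== PORT A =====
-- Python's `i==len(nums)-1 or nums[i]>max(nums[i+1:])` short-circuits, so max() is only
-- evaluated on a nonempty slice; max? is none exactly there and `.getD 0` is never
-- semantically relevant (the left disjunct already holds).
def dominant (nums : List Int) : Int :=
  if nums.length = 0 then -2
  else
    (PySem.List.pyRange 0 (nums.length : Int) 1).foldl
      (fun s i =>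
        if i = (nums.length : Int) - 1 ∨
            (PySem.List.max? (PySem.List.slice nums (some (i + 1)) none) (fun y => y)).getD 0
              < (PySem.List.pyGet? nums i).getD 0
        then s + (PySem.List.pyGet? nums i).getD 0
        else s)
      0

-- ===== PORT B =====
-- Source B reads nums[-1] twice (s = nums[-1]; m = nums[-1]); both reads appear literally.
def dominant_alt (nums : List Int) : Int :=
  if nums = [] then -2
  else
    ((PySem.List.slice nums none (some (-1))).reverse.foldl
      (fun (sm : Int × Int) x => if sm.2 < x then (sm.1 + x, x) else sm)
      ((PySem.List.pyGet? nums (-1)).getD 0, (PySem.List.pyGet? nums (-1)).getD 0)).1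

-- ===== PRECONDITION & SPEC =====
def Spec_dominant (nums : List Int) (out : Int) : Prop := out = dominant_alt nums
instance (nums : List Int) (out : Int) : Decidable (Spec_dominant nums out) := by unfold Spec_dominant; infer_instance

-- ===== CLAIM (what is proved, stated in full; the proofs are below) =====
def Claim_equal_dominant : Prop := ∀ (nums : List Int), Dom_dominant nums → Spec_dominant nums (dominant nums)

-- ===== LEMMAS AND PROOFS =====

-- max of a nonempty list (the [] value is never used on nonempty arguments)
def mxl : List Int → Int
  | [] => 0
  | [x] => x
  | x :: y :: t => max x (mxl (y :: t))

-- the common value: sum of elements strictly greater than everything after them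
def dsum : List Int → Int
  | [] => 0
  | [x] => x
  | x :: y :: t => if mxl (y :: t) < x then x + dsum (y :: t) else dsum (y :: t)

lemma mxl_cons (x : Int) (l : List Int) (h : l ≠ []) : mxl (x :: l) = max x (mxl l) := by
  cases l with
  | nil => exact absurd rfl h
  | cons y t => rfl

lemma dsum_cons (x : Int) (l : List Int) (h : l ≠ []) :
    dsum (x :: l) = if mxl l < x then x + dsum l else dsum l := by
  cases l with
  | nil => exact absurd rfl h
  | cons y t => rfl

lemma foldl_max_comm (t : List Int) (a x : Int) :
    t.foldl max (max a x) = max x (t.foldl max a) := by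
  induction t generalizing a with
  | nil => simp [max_comm]
  | cons b t ih =>
    simp only [List.foldl_cons]
    rw [show max (max a x) b = max (max a b) x by rw [max_right_comm], ih]

lemma foldl_max_eq_mxl (t : List Int) (y : Int) : t.foldl max y = mxl (y :: t) := by
  induction t generalizing y with
  | nil => rfl
  | cons b t ih =>
    rw [mxl_cons y (b :: t) (by simp), ← ih b]
    show t.foldl max (max y b) = max y (t.foldl max b)
    rw [max_comm y b]
    exact foldl_max_comm t b y

-- B's reversed loop, in foldr form: it returns (dsum, mxl) of ys ++ [last]
lemma B_foldr (ys : List Int) (last : Int) :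
    ys.foldr (fun x (sm : Int × Int) => if sm.2 < x then (sm.1 + x, x) else sm) (last, last)
      = (dsum (ys ++ [last]), mxl (ys ++ [last])) := by
  induction ys with
  | nil => rfl
  | cons x ys ih =>
    have hne : ys ++ [last] ≠ [] := by simp
    simp only [List.foldr_cons, ih, List.cons_append]
    rw [dsum_cons x _ hne, mxl_cons x _ hne]
    by_cases h : mxl (ys ++ [last]) < x
    · simp [h, max_eq_left (le_of_lt h), add_comm]
    · simp [h, max_eq_right (not_lt.mp h)]

-- the summand of A's loop, at natural index k
def FA (nums : List Int) (k : Nat) : Int :=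
  if (k : Int) = (nums.length : Int) - 1 ∨
      (PySem.List.max? (PySem.List.slice nums (some ((k : Int) + 1)) none) (fun y => y)).getD 0
        < (PySem.List.pyGet? nums (k : Int)).getD 0
  then (PySem.List.pyGet? nums (k : Int)).getD 0
  else 0

lemma FA_shift (x : Int) (xs : List Int) (k : Nat) :
    FA (x :: xs) (k + 1) = FA xs k := by
  unfold FA
  have hget : PySem.List.pyGet? (x :: xs) ((k + 1 : Nat) : Int)
      = PySem.List.pyGet? xs ((k : Nat) : Int) := by
    have := PySem.List.pyGet?_cons_succ (x := x) (xs := xs) (n := k)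
    rw [show (((k + 1 : Nat)) : Int) = (k : Int) + 1 by push_cast; ring]
    exact this
  have hslice : PySem.List.slice (x :: xs) (some (((k + 1 : Nat) : Int) + 1)) none
      = PySem.List.slice xs (some (((k : Nat) : Int) + 1)) none := by
    rw [show (((k + 1 : Nat) : Int) + 1) = ((k + 2 : Nat) : Int) by push_cast; ring,
        show (((k : Nat) : Int) + 1) = ((k + 1 : Nat) : Int) by push_cast; ring,
        PySem.List.slice_from_natCast, PySem.List.slice_from_natCast]
    simp [List.drop_succ_cons]
  have hiff : (((k + 1 : Nat) : Int) = (((x :: xs).length : Nat) : Int) - 1)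
      ↔ (((k : Nat) : Int) = ((xs.length : Nat) : Int) - 1) := by
    simp only [List.length_cons]; push_cast; omega
  rw [hget, hslice]
  simp only [hiff]

-- A's sum over range equals dsum
lemma SA_eq_dsum (nums : List Int) :
    ((List.range nums.length).map (FA nums)).sum = dsum nums := by
  induction nums with
  | nil => rfl
  | cons x xs ih =>
    cases xs with
    | nil =>
      simp [FA, dsum]
    | cons y t =>
      rw [List.length_cons, List.range_succ_eq_map]
      simp only [List.map_cons, List.map_map, List.sum_cons]
      have hshift : ((List.range (y :: t).length).map (FA (x :: y :: t) ∘ (· + 1))).sum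
          = ((List.range (y :: t).length).map (FA (y :: t))).sum := by
        apply congrArg
        apply List.map_congr_left
        intro k _
        exact FA_shift x (y :: t) k
      rw [hshift, ih]
      have h0 : FA (x :: y :: t) 0 = if mxl (y :: t) < x then x else 0 := by
        unfold FA
        have hsl : PySem.List.slice (x :: y :: t) (some (((0 : Nat) : Int) + 1)) none = y :: t := by
          rw [show (((0 : Nat) : Int) + 1) = ((1 : Nat) : Int) by norm_num,
              PySem.List.slice_from_natCast]
          simp
        rw [hsl, PySem.List.max?_id_cons y t, foldl_max_eq_mxl]
        have hC : ¬ ((0 : Int) = (t.length : Int) + 1) := by omega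
        simp [PySem.List.pyGet?_zero_cons, hC]
      rw [h0, dsum_cons x (y :: t) (by simp)]
      by_cases hc : mxl (y :: t) < x <;> simp [hc]

-- A's port computes the range-sum of FA
lemma dominant_eq_dsum (nums : List Int) (h : nums ≠ []) : dominant nums = dsum nums := by
  unfold dominant
  rw [if_neg (by simpa using h)]
  have hrange : PySem.List.pyRange 0 (nums.length : Int) 1
      = (List.range nums.length).map (fun k => ((k : Nat) : Int)) := by
    rw [PySem.List.pyRange_one]
    simp
  rw [hrange, List.foldl_map]
  have key : ∀ (a : Int) (l : List Nat),
      l.foldl (fun s k =>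
        if ((k : Nat) : Int) = (nums.length : Int) - 1 ∨
            (PySem.List.max? (PySem.List.slice nums (some (((k : Nat) : Int) + 1)) none) (fun y => y)).getD 0
              < (PySem.List.pyGet? nums ((k : Nat) : Int)).getD 0
        then s + (PySem.List.pyGet? nums ((k : Nat) : Int)).getD 0
        else s) a = a + (l.map (FA nums)).sum := by
    intro a l
    induction l generalizing a with
    | nil => simp
    | cons k l ihl =>
      simp only [List.foldl_cons, List.map_cons, List.sum_cons, ihl]
      unfold FA
      split <;> ring
  rw [key 0 (List.range nums.length), zero_add, SA_eq_dsum]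

-- B's port computes dsum too
lemma dominant_alt_eq_dsum (nums : List Int) (h : nums ≠ []) : dominant_alt nums = dsum nums := by
  unfold dominant_alt
  rw [if_neg h]
  have hlast : (PySem.List.pyGet? nums (-1)).getD 0 = nums.getLast h := by
    rw [PySem.List.pyGet?_neg_one, List.getLast?_eq_getLast_of_ne_nil h]
    rfl
  rw [hlast, PySem.List.slice_to_neg_one, List.foldl_reverse]
  have hb := B_foldr nums.dropLast (nums.getLast h)
  rw [List.dropLast_concat_getLast h] at hb
  rw [hb]

-- ===== VERDICT (by name: the statement is the Claim_ definition above) =====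
theorem dominant_spec : Claim_equal_dominant := by
  intro nums _
  unfold Spec_dominant
  by_cases h : nums = []
  · subst h; rfl
  · rw [dominant_eq_dsum nums h, dominant_alt_eq_dsum nums h]
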